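-- pv_equiv track=rewrite | github.com/bcgov/namex | api/namex/analytics/phonetic/__init__.py | first_vowels
-- ===== SOURCE A (Python) =====
-- def first_vowels(word, leading_vowel=False):
--     vowels = ['A', 'E', 'I', 'O', 'U', 'Y']
--     value = ''
--     first_vowel_found = False
--     for letter in word:
--         if letter not in vowels and first_vowel_found:
--             break
--         if letter in vowels:
--             value += letter
--             first_vowel_found = True
--
--     if not leading_vowel:
--         if value == 'EY':
--             value = 'A'
--         if value == 'EI':
--             value = 'A'
--         if value == 'EA':
--             value = 'A'
--         if value == 'AY':
--             value = 'A'
--         if value == 'AI':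
--             value = 'A'
--         if value == 'Y':
--             value = 'I'
--         if value == 'UE':
--             value = 'U'
--     else:
--         if value == 'OY':
--             value = 'OI'
--
--     if 'AA' in value:
--         value = value.replace('AA', 'A')
--
--     return value
-- ===== SOURCE B (Python) =====
-- def first_vowels(word, leading_vowel=False):
--     vowels = set('AEIOUY')
--     n = len(word)
--     i = 0
--     while i < n and word[i] not in vowels:
--         i += 1
--     j = i
--     while j < n and word[j] in vowels:
--         j += 1
--     value = word[i:j]
--     table = {'OY': 'OI'} if leading_vowel else {
--         'EY': 'A', 'EI': 'A', 'EA': 'A', 'AY': 'A', 'AI': 'A', 'Y': 'I', 'UE': 'U'}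
--     value = table.get(value, value)
--     return value.replace('AA', 'A')
-- ===== Notes on version B (the rewrite author's own statement) =====
-- stated objective: idiomatic
-- what changed: B replaces A's scan-with-flag character-accumulation loop by a two-pointer run extraction (skip non-vowels, advance over vowels, take one slice) and replaces the sequential if-reassignment chain by a single dict.get dispatch keyed per mode, with an unconditional replace.
import Mathlib
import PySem

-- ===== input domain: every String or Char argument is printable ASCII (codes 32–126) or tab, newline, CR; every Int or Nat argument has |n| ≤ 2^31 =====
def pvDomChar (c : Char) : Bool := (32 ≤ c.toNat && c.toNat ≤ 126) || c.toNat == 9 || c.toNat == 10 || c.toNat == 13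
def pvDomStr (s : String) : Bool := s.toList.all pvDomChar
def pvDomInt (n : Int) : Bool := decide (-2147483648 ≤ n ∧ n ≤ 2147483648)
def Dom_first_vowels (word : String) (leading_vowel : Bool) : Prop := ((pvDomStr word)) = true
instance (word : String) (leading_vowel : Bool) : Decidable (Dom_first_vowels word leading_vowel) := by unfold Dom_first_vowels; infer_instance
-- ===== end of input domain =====

-- B extracts the first vowel run with two index pointers and a slice and normalizes it via a
-- dict lookup, instead of A's flag-carrying accumulation loop and sequential if-chain.

-- ===== PORT A =====
def pvVowelsA : List Char := ['A', 'E', 'I', 'O', 'U', 'Y']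

-- the for-loop with the `break`: state = (value, first_vowel_found)
def pvLoopA : List Char → List Char → Bool → List Char
  | [], value, _ => value
  | c :: rest, value, found =>
    if c ∉ pvVowelsA ∧ found = true then value
    else if c ∈ pvVowelsA then pvLoopA rest (value ++ [c]) true
    else pvLoopA rest value found

-- the sequential if-reassignment chain
def pvNormA (leading_vowel : Bool) (value : String) : String :=
  if !leading_vowel then
    let value := if value = "EY" then "A" else value
    let value := if value = "EI" then "A" else value
    let value := if value = "EA" then "A" else value
    let value := if value = "AY" then "A" else value
    let value := if value = "AI" then "A" else value
    let value := if value = "Y" then "I" else value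
    let value := if value = "UE" then "U" else value
    value
  else
    if value = "OY" then "OI" else value

def first_vowels (word : String) (leading_vowel : Bool) : String :=
  let value := String.mk (pvLoopA word.toList [] false)
  let value := pvNormA leading_vowel value
  if PySem.Str.isIn "AA" value then PySem.Str.replace value "AA" "A" else value

-- ===== PORT B =====
def pvIsVowelB (c : Char) : Bool := PySem.Set.contains (PySem.Set.ofList "AEIOUY".toList) c

-- while i < n and word[i] not in vowels: i += 1   (nested if = short-circuit `and`)
def pvSkipB (cs : List Char) (i : Nat) : Nat :=
  if h : i < cs.length then
    if ¬ pvIsVowelB (cs[i]'h) then pvSkipB cs (i + 1) else i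
  else i
termination_by cs.length - i
decreasing_by omega

-- while j < n and word[j] in vowels: j += 1
def pvAdvB (cs : List Char) (j : Nat) : Nat :=
  if h : j < cs.length then
    if pvIsVowelB (cs[j]'h) then pvAdvB cs (j + 1) else j
  else j
termination_by cs.length - j
decreasing_by omega

def pvTableB (leading_vowel : Bool) : PySem.Dict String String :=
  if leading_vowel then PySem.Dict.ofList [("OY", "OI")]
  else PySem.Dict.ofList
    [("EY", "A"), ("EI", "A"), ("EA", "A"), ("AY", "A"), ("AI", "A"), ("Y", "I"), ("UE", "U")]

def first_vowels_alt (word : String) (leading_vowel : Bool) : String :=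
  let cs := word.toList
  let i := pvSkipB cs 0
  let j := pvAdvB cs i
  let value := String.mk (PySem.List.slice cs (some (i : Int)) (some (j : Int)))
  let value := (pvTableB leading_vowel).getD value value
  PySem.Str.replace value "AA" "A"

-- ===== PRECONDITION & SPEC =====
def Spec_first_vowels (word : String) (leading_vowel : Bool) (out : String) : Prop := out = first_vowels_alt word leading_vowel
instance (word : String) (leading_vowel : Bool) (out : String) : Decidable (Spec_first_vowels word leading_vowel out) := by unfold Spec_first_vowels; infer_instance

-- ===== CLAIM (what is proved, stated in full; the proofs are below) =====
def Claim_equal_first_vowels : Prop := ∀ (word : String) (leading_vowel : Bool), Dom_first_vowels word leading_vowel → Spec_first_vowels word leading_vowel (first_vowels word leading_vowel)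

-- ===== LEMMAS AND PROOFS =====

theorem pvIsVowelB_eq (c : Char) : pvIsVowelB c = decide (c ∈ pvVowelsA) := by
  simp [pvIsVowelB, pvVowelsA, PySem.Set.contains_eq_listContains, PySem.Set.ofList]

theorem pvLoopA_true (cs : List Char) (acc : List Char) :
    pvLoopA cs acc true = acc ++ cs.takeWhile (fun c => decide (c ∈ pvVowelsA)) := by
  induction cs generalizing acc with
  | nil => simp [pvLoopA]
  | cons c rest ih =>
    by_cases h : c ∈ pvVowelsA
    · simp [pvLoopA, h, ih]
    · simp [pvLoopA, h]

theorem pvLoopA_false (cs : List Char) :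
    pvLoopA cs [] false =
      (cs.dropWhile (fun c => !decide (c ∈ pvVowelsA))).takeWhile (fun c => decide (c ∈ pvVowelsA)) := by
  induction cs with
  | nil => simp [pvLoopA]
  | cons c rest ih =>
    by_cases h : c ∈ pvVowelsA
    · simp [pvLoopA, h, pvLoopA_true]
    · simp [pvLoopA, h, ih]

theorem pvSkipB_eq (cs : List Char) (i : Nat) :
    pvSkipB cs i = i + ((cs.drop i).takeWhile (fun c => !pvIsVowelB c)).length := by
  rw [pvSkipB]
  by_cases h : i < cs.length
  · rw [dif_pos h]
    have hd : cs[i] :: cs.drop (i + 1) = cs.drop i := List.getElem_cons_drop h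
    rw [← hd, List.takeWhile_cons]
    by_cases hv : pvIsVowelB cs[i] = true
    · rw [if_neg (by simp [hv])]
      simp [hv]
    · rw [if_pos (by simp [hv]), pvSkipB_eq cs (i + 1)]
      simp [Bool.not_eq_true] at hv
      simp [hv]
      omega
  · rw [dif_neg h]
    simp [List.drop_eq_nil_of_le (by omega : cs.length ≤ i)]
termination_by cs.length - i
decreasing_by omega

theorem pvAdvB_eq (cs : List Char) (j : Nat) :
    pvAdvB cs j = j + ((cs.drop j).takeWhile (fun c => pvIsVowelB c)).length := by
  rw [pvAdvB]
  by_cases h : j < cs.length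
  · rw [dif_pos h]
    have hd : cs[j] :: cs.drop (j + 1) = cs.drop j := List.getElem_cons_drop h
    rw [← hd, List.takeWhile_cons]
    by_cases hv : pvIsVowelB cs[j] = true
    · rw [if_pos hv, pvAdvB_eq cs (j + 1)]
      simp [hv]
      omega
    · rw [if_neg hv]
      simp [Bool.not_eq_true] at hv
      simp [hv]
  · rw [dif_neg h]
    simp [List.drop_eq_nil_of_le (by omega : cs.length ≤ j)]
termination_by cs.length - j
decreasing_by omega

theorem pvDropLenTakeWhile (l : List Char) (p : Char → Bool) :
    l.drop (l.takeWhile p).length = l.dropWhile p := by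
  nth_rewrite 2 [← List.takeWhile_append_dropWhile (p := p) (l := l)]
  rw [List.drop_left]

-- the two pointer scans produce exactly A's loop value
theorem pvRun_eq (cs : List Char) :
    PySem.List.slice cs (some ((pvSkipB cs 0 : Nat) : Int)) (some ((pvAdvB cs (pvSkipB cs 0) : Nat) : Int))
      = pvLoopA cs [] false := by
  have hP : (fun c => !decide (c ∈ pvVowelsA)) = (fun c => !pvIsVowelB c) := by
    funext c; rw [pvIsVowelB_eq]
  have hQ : (fun c => decide (c ∈ pvVowelsA)) = (fun c => pvIsVowelB c) := by
    funext c; rw [pvIsVowelB_eq]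
  have hi : pvSkipB cs 0 = (cs.takeWhile (fun c => !pvIsVowelB c)).length := by
    rw [pvSkipB_eq cs 0]; simp
  have hj : pvAdvB cs (pvSkipB cs 0)
      = pvSkipB cs 0 + ((cs.dropWhile (fun c => !pvIsVowelB c)).takeWhile (fun c => pvIsVowelB c)).length := by
    rw [pvAdvB_eq cs (pvSkipB cs 0)]
    rw [hi, pvDropLenTakeWhile]
  rw [pvLoopA_false, hP, hQ, hj, PySem.List.slice_natCast]
  have harith : pvSkipB cs 0 + ((cs.dropWhile (fun c => !pvIsVowelB c)).takeWhile (fun c => pvIsVowelB c)).length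
      - pvSkipB cs 0 = ((cs.dropWhile (fun c => !pvIsVowelB c)).takeWhile (fun c => pvIsVowelB c)).length := by
    omega
  rw [harith, hi, pvDropLenTakeWhile]
  exact (List.prefix_iff_eq_take.mp (List.takeWhile_prefix _)).symm

-- the if-chain equals the dict dispatch
theorem pvNorm_eq (leading_vowel : Bool) (v : String) :
    pvNormA leading_vowel v = (pvTableB leading_vowel).getD v v := by
  cases leading_vowel with
  | true =>
    by_cases h : v = "OY"
    · subst h; decide
    · have h' : ("OY" : String) ≠ v := fun e => h e.symm
      simp [pvNormA, pvTableB, h, PySem.Dict.getD, PySem.Dict.get?,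
        show (PySem.Dict.ofList [(("OY" : String), ("OI" : String))]).items = [("OY", "OI")] from rfl,
        List.find?, h']
  | false =>
    by_cases h1 : v = "EY"
    · subst h1; decide
    by_cases h2 : v = "EI"
    · subst h2; decide
    by_cases h3 : v = "EA"
    · subst h3; decide
    by_cases h4 : v = "AY"
    · subst h4; decide
    by_cases h5 : v = "AI"
    · subst h5; decide
    by_cases h6 : v = "Y"
    · subst h6; decide
    by_cases h7 : v = "UE"
    · subst h7; decide
    have g1 : (("EY" : String) == v) = false := beq_eq_false_iff_ne.mpr (fun e => h1 e.symm)
    have g2 : (("EI" : String) == v) = false := beq_eq_false_iff_ne.mpr (fun e => h2 e.symm)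
    have g3 : (("EA" : String) == v) = false := beq_eq_false_iff_ne.mpr (fun e => h3 e.symm)
    have g4 : (("AY" : String) == v) = false := beq_eq_false_iff_ne.mpr (fun e => h4 e.symm)
    have g5 : (("AI" : String) == v) = false := beq_eq_false_iff_ne.mpr (fun e => h5 e.symm)
    have g6 : (("Y" : String) == v) = false := beq_eq_false_iff_ne.mpr (fun e => h6 e.symm)
    have g7 : (("UE" : String) == v) = false := beq_eq_false_iff_ne.mpr (fun e => h7 e.symm)
    simp [pvNormA, pvTableB, h1, h2, h3, h4, h5, h6, h7, PySem.Dict.getD, PySem.Dict.get?,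
      show (PySem.Dict.ofList [(("EY" : String), ("A" : String)), ("EI", "A"), ("EA", "A"),
        ("AY", "A"), ("AI", "A"), ("Y", "I"), ("UE", "U")]).items
        = [("EY", "A"), ("EI", "A"), ("EA", "A"), ("AY", "A"), ("AI", "A"), ("Y", "I"), ("UE", "U")] from rfl,
      List.find?, g1, g2, g3, g4, g5, g6, g7]

-- if the pattern does not occur, replace is the identity
theorem pvReplaceGo_id (old new : List Char) :
    ∀ (fuel : Nat) (l acc : List Char), ¬ old <:+: l →
      PySem.Chars.replace.go old new fuel l acc = acc.reverse ++ l := by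
  intro fuel
  induction fuel with
  | zero => intro l acc _; rfl
  | succ n ih =>
    intro l acc h
    cases l with
    | nil => simp [PySem.Chars.replace.go]
    | cons c t =>
      have hpre : old.isPrefixOf (c :: t) = false := by
        rw [Bool.eq_false_iff]
        intro hc
        exact h (List.IsPrefix.isInfix (List.isPrefixOf_iff_prefix.mp hc))
      have ht : ¬ old <:+: t := fun hc => h (hc.trans (List.suffix_cons c t).isInfix)
      rw [PySem.Chars.replace.go, hpre]
      simp only [Bool.false_eq_true, if_false]
      rw [ih t (c :: acc) ht]
      simp

theorem pvReplace_id (v : String) (h : PySem.Str.isIn "AA" v = false) :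
    PySem.Str.replace v "AA" "A" = v := by
  have hc : PySem.Chars.isIn "AA".toList v.toList = false := by
    rw [← PySem.Str.isIn_eq]; exact h
  have hinf : ¬ ("AA".toList <:+: v.toList) := by
    intro hcc
    exact (PySem.Chars.isIn_eq_false_iff _ _).mp hc hcc
  apply String.toList_injective
  rw [PySem.Str.toList_replace, PySem.Chars.replace]
  rw [if_neg (by decide)]
  rw [pvReplaceGo_id "AA".toList "A".toList _ _ _ hinf]
  rfl

-- ===== VERDICT (by name: the statement is the Claim_ definition above) =====
theorem first_vowels_spec : Claim_equal_first_vowels := by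
  intro word leading_vowel _
  unfold Spec_first_vowels first_vowels first_vowels_alt
  simp only []
  rw [pvRun_eq word.toList, ← pvNorm_eq]
  set v := pvNormA leading_vowel (String.mk (pvLoopA word.toList [] false)) with hv
  by_cases h : PySem.Str.isIn "AA" v = true
  · rw [if_pos h]
  · rw [if_neg h, pvReplace_id v (Bool.eq_false_iff.mpr h)]
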